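-- pv_equiv track=rewrite | github.com/Valeria-tga/Learn | Tasks_Chapter_Six.py | full_list
-- ===== SOURCE A (Python) =====
-- def cycle_list_limit(number2):
--     number1=0
--     while True:
--         yield number1
--         number1 +=1
--         if number1>=number2:
--             number1=(number1)%(number2)
--
-- def full_list(list1,diff):
--     result_list=list1
--     if len(list1) == 1:
--         for i in cycle_list_limit(len(list1)):
--             result_list = result_list + list(list1[i])
--             diff = diff - 1
--             if diff == 0:
--                 break
--     else:
--         for i in cycle_list_limit(len(list1)-1):
--             result_list=result_list+list(list1[i])
--             diff=diff-1
--             if diff==0: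
--                 break
--     return result_list
-- ===== SOURCE B (Python) =====
-- def full_list(list1, diff):
--     # closed-form: one full cycle is repeated diff // m times plus a partial cycle
--     m = len(list1) if len(list1) == 1 else len(list1) - 1
--     body = [c for s in list1[:m] for c in s]
--     q, r = divmod(diff, m)
--     return list1 + body * q + [c for s in list1[:r] for c in s]
-- ===== Notes on version B (the rewrite author's own statement) =====
-- stated objective: faster
-- what changed: Replaces the cyclic generator with repeated list concatenation by a closed form: divmod(diff, m) gives the number of full cycles, and the result is built once as list1 + body*q + partial, avoiding O(diff) quadratic re-copies.
import Mathlib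
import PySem

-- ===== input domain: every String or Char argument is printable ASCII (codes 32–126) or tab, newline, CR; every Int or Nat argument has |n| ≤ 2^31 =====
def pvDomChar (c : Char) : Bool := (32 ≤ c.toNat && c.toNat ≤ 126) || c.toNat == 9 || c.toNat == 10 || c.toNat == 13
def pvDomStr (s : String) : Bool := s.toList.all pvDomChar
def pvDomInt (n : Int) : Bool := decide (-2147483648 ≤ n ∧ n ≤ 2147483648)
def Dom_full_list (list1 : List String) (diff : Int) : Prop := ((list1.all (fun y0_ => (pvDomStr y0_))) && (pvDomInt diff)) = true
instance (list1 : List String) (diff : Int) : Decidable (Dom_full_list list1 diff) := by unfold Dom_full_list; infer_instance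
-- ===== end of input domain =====

-- B replaces A's cyclic generator with quadratic list concatenation by a divmod closed form
-- (full cycles * q + partial cycle), building the result once: asymptotically faster.


-- ===== PORT A =====
-- list(s) for a string s: the list of its one-character strings
def pyChars (s : String) : List String := s.toList.map (fun c => String.ofList [c])

-- A's loop: fuel = the initial diff (the loop breaks exactly when diff reaches 0, so for
-- diff ≥ 1 that is the exact iteration count; diff ≤ 0 makes Python diverge — outside Pre_).
-- list1[i] is ported via pyGet?; the .getD "" default is only reached when the index is out of
-- range, i.e. list1 = [], where Python raises IndexError (outside Pre_).
def fullListLoopA (list1 : List String) (m : Int) : Nat → Int → Int → List String → List String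
  | 0, _, _, acc => acc
  | Nat.succ fuel, i, diff, acc =>
    let acc' := acc ++ pyChars ((PySem.List.pyGet? list1 i).getD "")
    let diff' := diff - 1
    if diff' = 0 then acc'
    else
      let i' := i + 1
      let i'' := if m ≤ i' then PySem.Int.mod i' m else i'
      fullListLoopA list1 m fuel i'' diff' acc'

def full_list (list1 : List String) (diff : Int) : List String :=
  if list1.length = 1 then
    fullListLoopA list1 (list1.length : Int) diff.toNat 0 diff list1
  else
    fullListLoopA list1 ((list1.length : Int) - 1) diff.toNat 0 diff list1

-- ===== PORT B =====
def full_list_alt (list1 : List String) (diff : Int) : List String :=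
  let m : Int := if list1.length = 1 then (list1.length : Int) else (list1.length : Int) - 1
  let body := (PySem.List.slice list1 none (some m)).flatMap pyChars
  match PySem.Int.divmod? diff m with
  | none => list1  -- unreachable under Pre_: m = 0 only when list1 = []
  | some (q, r) =>
      list1 ++ (List.replicate q.toNat body).flatten
            ++ (PySem.List.slice list1 none (some r)).flatMap pyChars

-- ===== PRECONDITION & SPEC =====
-- Pre_ excludes list1 = [] (A raises IndexError) and diff ≤ 0 (A's loop never terminates).
def Pre_full_list (list1 : List String) (diff : Int) : Prop := list1 ≠ [] ∧ 1 ≤ diff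
instance (list1 : List String) (diff : Int) : Decidable (Pre_full_list list1 diff) := by
  unfold Pre_full_list; infer_instance
def pvWitness_full_list : List String × Int := (["ab", "c", "d"], 7)

def Spec_full_list (list1 : List String) (diff : Int) (out : List String) : Prop := out = full_list_alt list1 diff
instance (list1 : List String) (diff : Int) (out : List String) : Decidable (Spec_full_list list1 diff out) := by unfold Spec_full_list; infer_instance

-- ===== CLAIM (what is proved, stated in full; the proofs are below) =====
def Claim_equal_full_list : Prop := ∀ (list1 : List String) (diff : Int), Dom_full_list list1 diff → Pre_full_list list1 diff → Spec_full_list list1 diff (full_list list1 diff)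

-- ===== LEMMAS AND PROOFS =====

-- chars contributed by index j
def cfAt (list1 : List String) (j : Int) : List String :=
  pyChars ((PySem.List.pyGet? list1 j).getD "")

-- A's loop appends the chars of list1[(i+k) % m] for k = 0 .. n-1
lemma loopA_eq (list1 : List String) (mN : Nat) (hm : 0 < mN) :
    ∀ (n : Nat) (i : Int) (acc : List String), 0 ≤ i → i < (mN : Int) → 0 < n →
    fullListLoopA list1 (mN : Int) n i (n : Int) acc
      = acc ++ (List.range n).flatMap (fun (k : Nat) => cfAt list1 ((i + (k : Int)) % (mN : Int))) := by
  intro n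
  induction n with
  | zero => intro i acc _ _ h; omega
  | succ n ih =>
    intro i acc h0 hlt _
    have hmz : (0 : Int) < (mN : Int) := by exact_mod_cast hm
    rw [fullListLoopA]
    simp only []
    have hd : ((n + 1 : Nat) : Int) - 1 = (n : Nat) := by push_cast; ring
    by_cases hn : n = 0
    · subst hn
      rw [if_pos (by norm_num)]
      simp [cfAt, Int.emod_eq_of_lt h0 hlt]
    · rw [if_neg (by omega), hd]
      set i'' := if (mN : Int) ≤ i + 1 then PySem.Int.mod (i + 1) (mN : Int) else i + 1 with hi''
      have hie : i'' = (i + 1) % (mN : Int) := by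
        rw [hi'']
        by_cases hc : (mN : Int) ≤ i + 1
        · rw [if_pos hc, PySem.Int.mod_eq_emod_of_pos hmz]
        · rw [if_neg hc, Int.emod_eq_of_lt (by omega) (by omega)]
      have h0' : 0 ≤ i'' := by rw [hie]; exact Int.emod_nonneg _ (by omega)
      have hlt' : i'' < (mN : Int) := by rw [hie]; exact Int.emod_lt_of_pos _ hmz
      rw [ih i'' _ h0' hlt' (by omega)]
      rw [List.range_succ_eq_map, List.flatMap_cons, List.flatMap_map]
      have hhead : cfAt list1 ((i + ((0 : Nat) : Int)) % (mN : Int)) = cfAt list1 i := by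
        simp [Int.emod_eq_of_lt h0 hlt]
      have htail : ∀ k : Nat, (i'' + (k : Int)) % (mN : Int) = (i + ((k + 1 : Nat) : Int)) % (mN : Int) := by
        intro k
        rw [hie, Int.emod_add_emod]
        congr 1
        push_cast; ring
      simp only [htail]
      simp [cfAt, List.append_assoc, Int.emod_eq_of_lt h0 hlt]

-- first t elements, as a range of indices
lemma takeFlat (list1 : List String) :
    ∀ t, t ≤ list1.length →
    (list1.take t).flatMap pyChars = (List.range t).flatMap (fun (k : Nat) => cfAt list1 (k : Int)) := by
  intro t
  induction t with
  | zero => intro _; simp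
  | succ t ih =>
    intro ht
    have ht' : t < list1.length := by omega
    rw [List.take_add_one, List.range_succ]
    simp only [List.flatMap_append, ih (by omega)]
    simp [cfAt, PySem.List.pyGet?_natCast, List.getElem?_eq_getElem ht']

-- unrolling the cyclic index pattern into q full cycles and a remainder
lemma cycleFlat (g : Nat → List String) (mN : Nat) (q r : Nat) :
    (List.range (q * mN + r)).flatMap (fun k => g (k % mN))
      = (List.replicate q ((List.range mN).flatMap (fun k => g (k % mN)))).flatten
        ++ (List.range r).flatMap (fun k => g (k % mN)) := by
  induction q with
  | zero => simp
  | succ q ih =>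
    have : (q + 1) * mN + r = mN + (q * mN + r) := by ring
    rw [this, List.range_add, List.flatMap_append, List.replicate_succ, List.flatten_cons]
    have hmap : List.flatMap (fun k => g (k % mN)) (List.map (fun x => mN + x) (List.range (q * mN + r)))
        = List.flatMap (fun k => g (k % mN)) (List.range (q * mN + r)) := by
      rw [List.flatMap_map]; congr 1; funext x; simp [Nat.add_mod_left]
    rw [hmap, ih, List.append_assoc]

-- both sides equal list1 ++ chars of list1[k % m] for k = 0 .. diff-1
lemma main_eq (list1 : List String) (diff : Int) (h1 : list1 ≠ []) (h2 : 1 ≤ diff) :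
    full_list list1 diff = full_list_alt list1 diff := by
  have hL : 0 < list1.length := List.length_pos_iff.mpr h1
  -- the common cycle length
  set mN : Nat := if list1.length = 1 then 1 else list1.length - 1 with hmN
  have hm : 0 < mN := by rw [hmN]; split <;> omega
  have hmL : mN ≤ list1.length := by rw [hmN]; split <;> omega
  have hmz : (0 : Int) < (mN : Int) := by exact_mod_cast hm
  have hn : ((diff.toNat : Nat) : Int) = diff := Int.toNat_of_nonneg (by omega)
  set n : Nat := diff.toNat with hdn
  have hn1 : 0 < n := by omega
  set g : Nat → List String := fun k => cfAt list1 (k : Int) with hg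
  -- A's side
  have hA : full_list list1 diff
      = list1 ++ (List.range n).flatMap (fun (k : Nat) => g (k % mN)) := by
    have hrw : ∀ mI : Int, mI = (mN : Int) →
        fullListLoopA list1 mI n 0 diff list1
          = list1 ++ (List.range n).flatMap (fun (k : Nat) => g (k % mN)) := by
      intro mI hmI
      rw [hmI, ← hn, loopA_eq list1 mN hm n 0 list1 le_rfl hmz hn1]
      congr 1
      apply List.flatMap_congr
      intro k _
      rw [hg]
      congr 1
      rw [zero_add]
      omega
    rw [full_list]
    by_cases hone : list1.length = 1
    · rw [if_pos hone, hdn, hrw _ (by rw [hmN, if_pos hone, hone])]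
    · rw [if_neg hone, hdn, hrw _ (by rw [hmN, if_neg hone]; omega)]
  -- B's side
  have hq0 : (0 : Int) ≤ diff / (mN : Int) := Int.ediv_nonneg (by omega) (by omega)
  have hr0 : (0 : Int) ≤ diff % (mN : Int) := Int.emod_nonneg _ (by omega)
  have hrlt : diff % (mN : Int) < (mN : Int) := Int.emod_lt_of_pos _ hmz
  set qN : Nat := (diff / (mN : Int)).toNat with hqN
  set rN : Nat := (diff % (mN : Int)).toNat with hrN
  have hrm : rN < mN := by omega
  have hsplit : n = qN * mN + rN := by
    have hid := Int.mul_ediv_add_emod diff (mN : Int)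
    have hcast : ((qN * mN + rN : Nat) : Int) = diff := by
      push_cast [hqN, hrN, Int.toNat_of_nonneg hq0, Int.toNat_of_nonneg hr0]
      linarith [hid]
    omega
  have hsmall : ∀ t, t ≤ mN →
      (List.range t).flatMap (fun (k : Nat) => g (k % mN)) = (List.range t).flatMap g := by
    intro t ht
    apply List.flatMap_congr
    intro k hk
    rw [List.mem_range] at hk
    rw [Nat.mod_eq_of_lt (by omega)]
  have hB : full_list_alt list1 diff
      = list1 ++ ((List.replicate qN ((List.range mN).flatMap g)).flatten
          ++ (List.range rN).flatMap g) := by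
    rw [full_list_alt]
    have hmB : (if list1.length = 1 then (list1.length : Int) else (list1.length : Int) - 1)
        = (mN : Int) := by
      rw [hmN]
      by_cases hone : list1.length = 1
      · rw [if_pos hone, if_pos hone, hone]
      · rw [if_neg hone, if_neg hone]; omega
    rw [hmB]
    have hdm : PySem.Int.divmod? diff (mN : Int)
        = some (diff / (mN : Int), diff % (mN : Int)) := by
      simp [PySem.Int.divmod?, Int.fdiv_eq_ediv, Int.fmod_eq_emod, hmz.le]
      omega
    rw [hdm]
    simp only [PySem.List.slice_to list1 hmz.le, PySem.List.slice_to list1 hr0, Int.toNat_natCast]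
    rw [takeFlat list1 mN hmL, takeFlat list1 rN (by omega), List.append_assoc, hg]
  rw [hA, hB, hsplit, cycleFlat g mN qN rN, hsmall mN le_rfl, hsmall rN (by omega)]

-- ===== VERDICT (by name: the statement is the Claim_ definition above) =====
theorem full_list_spec : Claim_equal_full_list := by
  intro list1 diff _ hpre
  exact main_eq list1 diff hpre.1 hpre.2
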